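-- pv_equiv track=rewrite | github.com/abdulrahmansa4/cybersecurity-tool | core/threats.py | extract_ai_threat_data
-- ===== SOURCE A (Python) =====
-- def extract_ai_threat_data(text):
--     threat = explain = fix = ""
--     for line in text.splitlines():
--         if line.lower().startswith("threat:"):
--             threat = line.split(":", 1)[1].strip()
--         elif line.lower().startswith("explanation:"):
--             explain = line.split(":", 1)[1].strip()
--         elif line.lower().startswith("fix:"):
--             fix = line.split(":", 1)[1].strip()
--     return threat, explain, fix
-- ===== SOURCE B (Python) =====
-- def extract_ai_threat_data(text):
--     fields = {}
--     for line in text.splitlines():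
--         key, sep, value = line.partition(":")
--         if sep:
--             fields[key.lower()] = value.strip()
--     return fields.get("threat", ""), fields.get("explanation", ""), fields.get("fix", "")
-- ===== Notes on version B (the rewrite author's own statement) =====
-- stated objective: alternative
-- what changed: Replaces A's if/elif cascade of lowered-startswith tests with per-field assignment by a single partition-on-first-colon pass that stores every colon-containing line in a dict keyed by the lowered text before the colon (last occurrence wins) and reads the three fields off the dict afterward.
import Mathlib
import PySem

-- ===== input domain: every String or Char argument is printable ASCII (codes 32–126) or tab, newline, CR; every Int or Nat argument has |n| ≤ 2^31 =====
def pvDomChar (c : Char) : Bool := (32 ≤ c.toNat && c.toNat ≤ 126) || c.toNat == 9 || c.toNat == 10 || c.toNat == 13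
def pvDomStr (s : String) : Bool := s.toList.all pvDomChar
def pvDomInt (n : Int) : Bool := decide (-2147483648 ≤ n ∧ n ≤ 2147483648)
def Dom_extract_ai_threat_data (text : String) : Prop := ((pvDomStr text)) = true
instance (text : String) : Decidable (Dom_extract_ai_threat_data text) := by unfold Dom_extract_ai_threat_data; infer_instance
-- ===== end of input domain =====

-- B replaces A's if/elif cascade of startswith tests by one partition-into-a-dict pass
-- followed by three lookups (objective: alternative; same behaviour, no speed claim).

-- ===== PORT A =====
-- loop body of A's for-loop, named for the proofs; line.split(":", 1) always returns some
-- (the separator ":" is nonempty) and, inside a branch whose test found ":", has an element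
-- at index 1, so the getD/pyGetD defaults below are never used.
def pvStepA (st : String × String × String) (line : String) : String × String × String :=
  if PySem.Str.startswith (PySem.Str.lower line) "threat:" then
    (PySem.Str.strip (PySem.List.pyGetD ((PySem.Str.splitMax? line ":" 1).getD []) 1 ""), st.2.1, st.2.2)
  else if PySem.Str.startswith (PySem.Str.lower line) "explanation:" then
    (st.1, PySem.Str.strip (PySem.List.pyGetD ((PySem.Str.splitMax? line ":" 1).getD []) 1 ""), st.2.2)
  else if PySem.Str.startswith (PySem.Str.lower line) "fix:" then
    (st.1, st.2.1, PySem.Str.strip (PySem.List.pyGetD ((PySem.Str.splitMax? line ":" 1).getD []) 1 ""))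
  else st

def extract_ai_threat_data (text : String) : String × String × String :=
  (PySem.Str.splitlines text).foldl pvStepA ("", "", "")

-- ===== PORT B =====
-- hand port of str.partition(":") for the one-character separator ":": a single scan to the
-- first ':' returning (head, found?, tail); exact (Python's three-string result is encoded
-- with a Bool for the middle component, tested where Source B tests `if sep:`).
def pvPartitionColon (cs : List Char) : List Char × Bool × List Char :=
  match cs with
  | [] => ([], false, [])
  | c :: rest =>
    if c = ':' then ([], true, rest)
    else
      let p := pvPartitionColon rest
      (c :: p.1, p.2.1, p.2.2)

-- loop body of B's for-loop, named for the proofs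
def pvStepB (d : PySem.Dict String String) (line : String) : PySem.Dict String String :=
  let p := pvPartitionColon line.toList
  if p.2.1 then
    d.insert (PySem.Str.lower (String.ofList p.1)) (PySem.Str.strip (String.ofList p.2.2))
  else d

def extract_ai_threat_data_alt (text : String) : String × String × String :=
  let d := (PySem.Str.splitlines text).foldl pvStepB PySem.Dict.empty
  (d.getD "threat" "", d.getD "explanation" "", d.getD "fix" "")

-- ===== PRECONDITION & SPEC =====
def Spec_extract_ai_threat_data (text : String) (out : String × String × String) : Prop := out = extract_ai_threat_data_alt text
instance (text : String) (out : String × String × String) : Decidable (Spec_extract_ai_threat_data text out) := by unfold Spec_extract_ai_threat_data; infer_instance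

-- ===== CLAIM (what is proved, stated in full; the proofs are below) =====
def Claim_equal_extract_ai_threat_data : Prop := ∀ (text : String), Dom_extract_ai_threat_data text → Spec_extract_ai_threat_data text (extract_ai_threat_data text)

-- ===== LEMMAS AND PROOFS =====

-- the three fields A tracks, read off B's dictionary
def pvTripleOf (d : PySem.Dict String String) : String × String × String :=
  (d.getD "threat" "", d.getD "explanation" "", d.getD "fix" "")

theorem pvLowerChar_eq_colon_iff (c : Char) : PySem.Chars.lowerChar c = ':' ↔ c = ':' := by
  constructor
  · intro hc
    by_cases h : PySem.Chars.isupper c = true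
    · exfalso
      unfold PySem.Chars.lowerChar at hc
      rw [if_pos h] at hc
      simp only [PySem.Chars.isupper, Bool.and_eq_true, decide_eq_true_eq, Char.le_def] at h
      have h1 : (65 : Nat) ≤ c.toNat := h.1
      have h2 : c.toNat ≤ 90 := h.2
      have hv : (c.toNat + 32).isValidChar := Or.inl (by omega)
      have ht := congrArg Char.toNat hc
      rw [Char.toNat_ofNat, if_pos hv] at ht
      simp only [show (':' : Char).toNat = 58 from rfl] at ht
      omega
    · unfold PySem.Chars.lowerChar at hc
      rwa [if_neg h] at hc
  · intro hc; subst hc; rfl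

-- A's lowered-startswith test, read through B's partition: the line starts (case-insensitively)
-- with `p ++ ":"` iff partition finds a colon and the lowered head equals p.
theorem pvStartswith_eq (cs p : List Char) (hp : ':' ∉ p) :
    PySem.Chars.startswith (PySem.Chars.lower cs) (p ++ [':'])
      = ((pvPartitionColon cs).2.1 && (PySem.Chars.lower (pvPartitionColon cs).1 == p)) := by
  have lcolon : PySem.Chars.lowerChar ':' = ':' := rfl
  induction cs generalizing p with
  | nil =>
    simp [PySem.Chars.startswith, PySem.Chars.lower, pvPartitionColon]
  | cons c rest ih =>
    simp only [PySem.Chars.lower, List.map] at *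
    by_cases hc : c = ':'
    · subst hc
      cases p with
      | nil =>
        simp [pvPartitionColon, PySem.Chars.startswith, List.isPrefixOf, lcolon]
      | cons q p' =>
        have hq : (q == PySem.Chars.lowerChar ':') = false := by
          rw [lcolon]
          simp only [beq_eq_false_iff_ne, ne_eq]
          exact fun h => hp (h ▸ List.mem_cons_self ..)
        simp [pvPartitionColon, PySem.Chars.startswith, List.isPrefixOf, hq]
    · have hlc : PySem.Chars.lowerChar c ≠ ':' :=
        fun h => hc ((pvLowerChar_eq_colon_iff c).mp h)
      simp only [pvPartitionColon, if_neg hc]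
      cases p with
      | nil =>
        have h0 : (':' == PySem.Chars.lowerChar c) = false := by
          simp only [beq_eq_false_iff_ne, ne_eq]
          exact fun h => hlc h.symm
        simp [PySem.Chars.startswith, List.isPrefixOf, h0]
      | cons q p' =>
        have hp' : ':' ∉ p' := fun h => hp (List.mem_cons_of_mem _ h)
        have := ih p' hp'
        simp only [PySem.Chars.startswith] at this ⊢
        simp [List.isPrefixOf, this]
        by_cases hcq : PySem.Chars.lowerChar c = q
        · simp [hcq]
        · have a1 : (q == PySem.Chars.lowerChar c) = false := by
            simp only [beq_eq_false_iff_ne, ne_eq]; exact fun h => hcq h.symm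
          have a2 : (PySem.Chars.lowerChar c == q) = false := by
            simp only [beq_eq_false_iff_ne, ne_eq]; exact hcq
          simp [a1, a2]

theorem pvGoZero (fuel : Nat) (l cur : List Char) (acc : List (List Char)) (hf : 0 < fuel) :
    PySem.Chars.splitOnMax.go [':'] fuel 0 l cur acc = ((cur.reverse ++ l) :: acc).reverse := by
  match fuel, hf with
  | fuel + 1, _ =>
    cases l with
    | nil => simp [PySem.Chars.splitOnMax.go]
    | cons c rest => simp [PySem.Chars.splitOnMax.go]

theorem pvGoOne (cs : List Char) (fuel : Nat) (cur : List Char) (acc : List (List Char))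
    (hf : cs.length < fuel) :
    PySem.Chars.splitOnMax.go [':'] fuel 1 cs cur acc
      = if (pvPartitionColon cs).2.1 then
          acc.reverse ++ [cur.reverse ++ (pvPartitionColon cs).1, (pvPartitionColon cs).2.2]
        else acc.reverse ++ [cur.reverse ++ cs] := by
  induction cs generalizing fuel cur acc with
  | nil =>
    match fuel, hf with
    | fuel + 1, _ => simp [PySem.Chars.splitOnMax.go, pvPartitionColon]
  | cons c rest ih =>
    match fuel, hf with
    | fuel + 1, hf =>
      by_cases hc : c = ':'
      · subst hc
        have hpre : [':'].isPrefixOf (':' :: rest) = true := by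
          simp [List.isPrefixOf]
        simp only [PySem.Chars.splitOnMax.go, hpre, if_pos]
        have hf' : 0 < fuel := by simp at hf; omega
        rw [show (1 : Nat) - 1 = 0 from rfl, show ([':'] : List Char).length = 1 from rfl]
        rw [pvGoZero fuel _ _ _ hf']
        simp [pvPartitionColon]
      · have hpre : [':'].isPrefixOf (c :: rest) = false := by
          simp [List.isPrefixOf, Ne.symm hc]
        have hf' : rest.length < fuel := by simp at hf; omega
        simp only [PySem.Chars.splitOnMax.go, hpre]
        simp only [Bool.false_eq_true, if_false, if_neg (by decide : ¬ (1 : Nat) = 0)]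
        rw [ih fuel (c :: cur) acc hf']
        simp [pvPartitionColon, hc]

theorem pvSplitMax_eq (line : String) :
    PySem.Str.splitMax? line ":" 1
      = some (if (pvPartitionColon line.toList).2.1 then
          [String.ofList (pvPartitionColon line.toList).1, String.ofList (pvPartitionColon line.toList).2.2]
        else [line]) := by
  have hsep : (":" : String).toList = [':'] := rfl
  simp only [PySem.Str.splitMax?, hsep, PySem.Chars.splitMax?]
  rw [if_neg (by decide)]
  have : PySem.Chars.splitOnMax line.toList [':'] 1
      = if (pvPartitionColon line.toList).2.1 then
          [(pvPartitionColon line.toList).1, (pvPartitionColon line.toList).2.2]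
        else [line.toList] := by
    unfold PySem.Chars.splitOnMax
    rw [if_neg (by decide)]
    rw [show ((1 : Int).toNat) = 1 from rfl]
    rw [pvGoOne line.toList (line.toList.length + 1) [] [] (by omega)]
    simp
  rw [this]
  by_cases h : (pvPartitionColon line.toList).2.1 <;> simp [h]

-- the lowered key as a String equals k iff the lowered key chars equal k.toList
theorem pvLowerKey_eq_iff (ks : List Char) (k : String) :
    PySem.Str.lower (String.ofList ks) = k ↔ PySem.Chars.lower ks = k.toList := by
  constructor
  · intro h
    have := congrArg String.toList h
    simpa using this
  · intro h
    apply String.ext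
    simpa using h

-- one line: A's field update equals B's dict insert, through pvTripleOf
theorem pvStep_eq (d : PySem.Dict String String) (line : String) :
    pvStepA (pvTripleOf d) line = pvTripleOf (pvStepB d line) := by
  have hth := pvStartswith_eq line.toList "threat".toList (by decide)
  have hex := pvStartswith_eq line.toList "explanation".toList (by decide)
  have hfx := pvStartswith_eq line.toList "fix".toList (by decide)
  have hsplit := pvSplitMax_eq line
  unfold pvStepA pvStepB
  simp only [PySem.Str.startswith_eq, PySem.Str.toList_lower]
  rw [show ("threat:" : String).toList = "threat".toList ++ [':'] from rfl,
      show ("explanation:" : String).toList = "explanation".toList ++ [':'] from rfl,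
      show ("fix:" : String).toList = "fix".toList ++ [':'] from rfl]
  rw [hth, hex, hfx, hsplit]
  by_cases hcol : (pvPartitionColon line.toList).2.1
  · have hget : PySem.List.pyGetD
        [String.ofList (pvPartitionColon line.toList).1, String.ofList (pvPartitionColon line.toList).2.2] 1 ""
        = String.ofList (pvPartitionColon line.toList).2.2 := by
      rw [PySem.List.pyGetD_ofNat']; rfl
    by_cases h1 : PySem.Chars.lower (pvPartitionColon line.toList).1 = "threat".toList
    · have hKs : PySem.Str.lower (String.ofList (pvPartitionColon line.toList).1) = "threat" :=
        (pvLowerKey_eq_iff _ _).mpr h1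
      simp only [pvTripleOf, hcol, h1, hget, hKs, beq_self_eq_true, Bool.true_and, if_true,
        Option.getD_some, PySem.Dict.getD_insert]
      simp
    · have e1 : (PySem.Chars.lower (pvPartitionColon line.toList).1 == "threat".toList) = false := by
        simp only [beq_eq_false_iff_ne, ne_eq]; exact h1
      by_cases h2 : PySem.Chars.lower (pvPartitionColon line.toList).1 = "explanation".toList
      · have hKs : PySem.Str.lower (String.ofList (pvPartitionColon line.toList).1) = "explanation" :=
          (pvLowerKey_eq_iff _ _).mpr h2
        simp only [pvTripleOf, hcol, h2, hget, hKs, beq_self_eq_true, Bool.true_and,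
          if_true, Option.getD_some, PySem.Dict.getD_insert]
        simp
      · have e2 : (PySem.Chars.lower (pvPartitionColon line.toList).1 == "explanation".toList) = false := by
          simp only [beq_eq_false_iff_ne, ne_eq]; exact h2
        by_cases h3 : PySem.Chars.lower (pvPartitionColon line.toList).1 = "fix".toList
        · have hKs : PySem.Str.lower (String.ofList (pvPartitionColon line.toList).1) = "fix" :=
            (pvLowerKey_eq_iff _ _).mpr h3
          simp only [pvTripleOf, hcol, h3, hget, hKs, beq_self_eq_true, Bool.true_and,
            if_true, Option.getD_some, PySem.Dict.getD_insert]
          simp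
        · have e3 : (PySem.Chars.lower (pvPartitionColon line.toList).1 == "fix".toList) = false := by
            simp only [beq_eq_false_iff_ne, ne_eq]; exact h3
          have hKne : ∀ k : String, PySem.Chars.lower (pvPartitionColon line.toList).1 ≠ k.toList →
              ¬ k = PySem.Str.lower (String.ofList (pvPartitionColon line.toList).1) := by
            intro k hk he
            exact hk ((pvLowerKey_eq_iff _ k).mp he.symm)
          simp only [pvTripleOf, hcol, e1, e2, e3, Bool.true_and, Bool.false_eq_true, if_false,
            if_true]
          rw [PySem.Dict.getD_insert, PySem.Dict.getD_insert, PySem.Dict.getD_insert,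
              if_neg (hKne _ h1), if_neg (hKne _ h2), if_neg (hKne _ h3)]
  · simp [hcol, pvTripleOf]

theorem pvFold_eq (lines : List String) (d : PySem.Dict String String) :
    lines.foldl pvStepA (pvTripleOf d) = pvTripleOf (lines.foldl pvStepB d) := by
  induction lines generalizing d with
  | nil => rfl
  | cons l rest ih =>
    simp only [List.foldl_cons, pvStep_eq d l, ih (pvStepB d l)]

-- ===== VERDICT (by name: the statement is the Claim_ definition above) =====
theorem extract_ai_threat_data_spec : Claim_equal_extract_ai_threat_data := by
  intro text _
  unfold Spec_extract_ai_threat_data extract_ai_threat_data extract_ai_threat_data_alt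
  have h0 : ("", "", "") = pvTripleOf PySem.Dict.empty := by
    simp [pvTripleOf, PySem.Dict.getD_empty]
  rw [h0, pvFold_eq]
  rfl
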